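-- pv_equiv track=rewrite | github.com/yashianand/AFS | baseline/helper_functions.py | get_preferred_state_action_pairs
-- ===== SOURCE A (Python) =====
-- def get_preferred_state_action_pairs(all_state_action_labels):
--     preferred_state_action_pairs = {}
--     for (state, action), label in all_state_action_labels.items():
--         if state not in preferred_state_action_pairs:
--             preferred_state_action_pairs[state] = set()
--         if (label==0) and (action not in preferred_state_action_pairs[state]):
--             preferred_state_action_pairs[state].add(action)
--     return preferred_state_action_pairs
-- ===== SOURCE B (Python) =====
-- def get_preferred_state_action_pairs(all_state_action_labels):
--     # stage 1: group every (action, label) pair under its state, keeping order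
--     buckets = {}
--     for (state, action), label in all_state_action_labels.items():
--         buckets.setdefault(state, []).append((action, label))
--     # stage 2: aggregate each bucket into its set of label-0 actions
--     return {state: {a for (a, l) in pairs if l == 0}
--             for state, pairs in buckets.items()}
-- ===== Notes on version B (the rewrite author's own statement) =====
-- stated objective: alternative
-- what changed: A's single pass building the final sets in place (lazy empty-set init, label guard, membership-checked add) is replaced by a two-stage group-then-aggregate: first materialize per-state buckets of all (action, label) pairs, then a second stage turns each bucket into its set of label-0 actions by a filtering set comprehension.
import Mathlib
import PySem

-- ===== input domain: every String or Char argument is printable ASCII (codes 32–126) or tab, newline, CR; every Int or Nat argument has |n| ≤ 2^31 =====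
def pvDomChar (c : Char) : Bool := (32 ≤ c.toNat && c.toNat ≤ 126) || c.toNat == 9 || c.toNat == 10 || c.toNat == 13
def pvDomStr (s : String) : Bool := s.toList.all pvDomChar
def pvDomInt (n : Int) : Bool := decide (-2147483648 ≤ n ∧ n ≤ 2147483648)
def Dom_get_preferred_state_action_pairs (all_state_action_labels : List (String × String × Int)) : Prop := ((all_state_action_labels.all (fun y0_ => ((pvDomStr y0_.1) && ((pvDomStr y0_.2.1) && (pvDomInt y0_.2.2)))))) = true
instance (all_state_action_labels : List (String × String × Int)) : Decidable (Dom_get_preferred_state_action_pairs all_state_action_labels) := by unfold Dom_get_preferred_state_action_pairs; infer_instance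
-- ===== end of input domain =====

-- B replaces A's single pass building the final sets in place by a two-stage group-then-
-- aggregate: stage 1 buckets all (action, label) pairs per state, stage 2 aggregates each
-- bucket into its set of label-0 actions. Dict = association list; dict values = Python sets.

-- ===== PORT A =====
-- the body of A's 'if (label==0) and (action not in …): ….add(action)'
def pvStepA2 (d1 : PySem.Dict String (List String)) (p : String × String × Int) :
    PySem.Dict String (List String) :=
  if p.2.2 == 0 && !(PySem.Set.contains (d1.getD p.1 []) p.2.1) then
    d1.modify p.1 [] (fun s => PySem.Set.add s p.2.1)
  else d1

-- one step of A's loop: 'if state not in …: …[state] = set()' followed by the guarded add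
def pvStepA (d : PySem.Dict String (List String)) (p : String × String × Int) :
    PySem.Dict String (List String) :=
  pvStepA2 (if d.contains p.1 then d else d.insert p.1 ([] : List String)) p

def get_preferred_state_action_pairs (all_state_action_labels : List (String × String × Int)) :
    List (String × List String) :=
  (all_state_action_labels.foldl pvStepA PySem.Dict.empty).items

-- ===== PORT B =====
-- stage 1 step: "buckets.setdefault(state, []).append((action, label))"
def pvBStep (d : PySem.Dict String (List (String × Int))) (p : String × String × Int) :
    PySem.Dict String (List (String × Int)) :=
  d.modify p.1 [] (fun l => l ++ [(p.2.1, p.2.2)])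

def get_preferred_state_action_pairs_alt (all_state_action_labels : List (String × String × Int)) :
    List (String × List String) :=
  -- stage 2 over stage 1: "{state: {a for (a, l) in pairs if l == 0} for state, pairs in buckets.items()}"
  ((all_state_action_labels.foldl pvBStep PySem.Dict.empty).items).map
    (fun e => (e.1, PySem.Set.ofList
      ((e.2.filter (fun q => q.2 == 0)).map (fun q => q.1))))

-- ===== PRECONDITION & SPEC =====
def Spec_get_preferred_state_action_pairs (all_state_action_labels : List (String × String × Int)) (out : List (String × List String)) : Prop := out = get_preferred_state_action_pairs_alt all_state_action_labels
instance (all_state_action_labels : List (String × String × Int)) (out : List (String × List String)) : Decidable (Spec_get_preferred_state_action_pairs all_state_action_labels out) := by unfold Spec_get_preferred_state_action_pairs; infer_instance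

-- ===== CLAIM (what is proved, stated in full; the proofs are below) =====
def Claim_equal_get_preferred_state_action_pairs : Prop := ∀ (all_state_action_labels : List (String × String × Int)), Dom_get_preferred_state_action_pairs all_state_action_labels → Spec_get_preferred_state_action_pairs all_state_action_labels (get_preferred_state_action_pairs all_state_action_labels)

-- ===== LEMMAS AND PROOFS =====

-- one A-step only adds the state to the key list
theorem pvStepA_keys (d : PySem.Dict String (List String)) (p : String × String × Int) :
    (pvStepA d p).keys = PySem.Set.add d.keys p.1 := by
  unfold pvStepA pvStepA2
  by_cases h : d.contains p.1 = true
  · have hm : p.1 ∈ d.keys := (PySem.Dict.contains_iff_mem_keys d p.1).mp h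
    simp only [h, if_true]
    split
    · rw [PySem.Dict.keys_modify, PySem.Dict.keys_insert_of_contains d _ h,
        PySem.Set.add_of_mem hm]
    · rw [PySem.Set.add_of_mem hm]
  · have h' : d.contains p.1 = false := by simpa using h
    have hm : p.1 ∉ d.keys := fun hx =>
      absurd ((PySem.Dict.contains_iff_mem_keys d p.1).mpr hx) h
    simp only [h', Bool.false_eq_true, if_false]
    split
    · rw [PySem.Dict.keys_modify,
        PySem.Dict.keys_insert_of_contains _ _ (PySem.Dict.contains_insert_self d p.1 []),
        PySem.Dict.keys_insert_of_not_contains d _ h', PySem.Set.add_of_not_mem hm]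
    · rw [PySem.Dict.keys_insert_of_not_contains d _ h', PySem.Set.add_of_not_mem hm]

-- one A-step's effect on the value stored at any key k
theorem pvStepA_getD (d : PySem.Dict String (List String)) (p : String × String × Int)
    (k : String) :
    (pvStepA d p).getD k [] =
      if p.1 = k ∧ p.2.2 = 0 then PySem.Set.add (d.getD k []) p.2.1 else d.getD k [] := by
  unfold pvStepA pvStepA2
  set d1 := if d.contains p.1 then d else d.insert p.1 ([] : List String) with hd1
  have h1 : ∀ j, d1.getD j [] = d.getD j [] := by
    intro j
    rw [hd1]
    by_cases h : d.contains p.1 = true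
    · simp only [h, if_true]
    · have h' : d.contains p.1 = false := by simpa using h
      simp only [h', Bool.false_eq_true, if_false]
      rw [PySem.Dict.getD_insert]
      by_cases hj : j = p.1
      · subst hj; rw [if_pos rfl, PySem.Dict.getD_of_not_contains d [] h']
      · rw [if_neg hj]
  by_cases hb : (p.2.2 == 0 && !(PySem.Set.contains (d1.getD p.1 []) p.2.1)) = true
  · rw [if_pos hb]
    have hz : p.2.2 = 0 := by
      have := (Bool.and_eq_true _ _).mp hb
      simpa using this.1
    rw [PySem.Dict.getD_modify]
    by_cases hk : k = p.1
    · subst hk; rw [if_pos rfl, h1, if_pos ⟨rfl, hz⟩]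
    · rw [if_neg hk, h1, if_neg (fun hc => hk hc.1.symm)]
  · rw [if_neg hb, h1]
    by_cases hcond : p.1 = k ∧ p.2.2 = 0
    · obtain ⟨hk, hz⟩ := hcond
      have hmem : p.2.1 ∈ d.getD p.1 [] := by
        rw [← h1 p.1]
        by_contra hm
        exact hb (by simp [hz, hm])
      subst hk
      rw [if_pos ⟨rfl, hz⟩, PySem.Set.add_of_mem hmem]
    · rw [if_neg hcond]

-- A's loop as a whole: keys in first-appearance order
theorem pvFoldA_keys (xs : List (String × String × Int)) (d : PySem.Dict String (List String)) :
    (xs.foldl pvStepA d).keys = PySem.Set.update d.keys (xs.map (fun p => p.1)) := by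
  induction xs generalizing d with
  | nil => simp [PySem.Set.update]
  | cons p t ih =>
    simp only [List.foldl_cons, List.map_cons]
    rw [ih, pvStepA_keys]
    simp [PySem.Set.update]

-- A's loop as a whole: the value at k collects the label-0 actions of state k
theorem pvFoldA_getD (xs : List (String × String × Int)) (d : PySem.Dict String (List String))
    (k : String) :
    (xs.foldl pvStepA d).getD k [] =
      ((xs.filter (fun p => p.1 == k && p.2.2 == 0)).map (fun p => p.2.1)).foldl
        PySem.Set.add (d.getD k []) := by
  induction xs generalizing d with
  | nil => simp
  | cons p t ih =>
    simp only [List.foldl_cons]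
    rw [ih, pvStepA_getD]
    by_cases hc : p.1 = k ∧ p.2.2 = 0
    · have hcb : (p.1 == k && p.2.2 == 0) = true := by simp [hc.1, hc.2]
      rw [if_pos hc]
      simp only [List.filter_cons, hcb, if_true, List.map_cons, List.foldl_cons]
    · have hcb : (p.1 == k && p.2.2 == 0) = false := by
        cases hX : (p.1 == k && p.2.2 == 0)
        · rfl
        · exact absurd (by simpa using (Bool.and_eq_true _ _).mp hX) (by simpa using hc)
      rw [if_neg hc]
      simp only [List.filter_cons, hcb, Bool.false_eq_true, if_false]

-- B's stage-1 loop: keys in first-appearance order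
theorem pvFoldB_keys (xs : List (String × String × Int))
    (d : PySem.Dict String (List (String × Int))) :
    (xs.foldl pvBStep d).keys = PySem.Set.update d.keys (xs.map (fun p => p.1)) := by
  induction xs generalizing d with
  | nil => simp [PySem.Set.update]
  | cons p t ih =>
    have hstep : (pvBStep d p).keys = PySem.Set.add d.keys p.1 := by
      unfold pvBStep
      rw [PySem.Dict.keys_modify]
      by_cases h : d.contains p.1 = true
      · rw [PySem.Dict.keys_insert_of_contains d _ h,
          PySem.Set.add_of_mem ((PySem.Dict.contains_iff_mem_keys d p.1).mp h)]
      · have h' : d.contains p.1 = false := by simpa using h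
        rw [PySem.Dict.keys_insert_of_not_contains d _ h',
          PySem.Set.add_of_not_mem (fun hx =>
            absurd ((PySem.Dict.contains_iff_mem_keys d p.1).mpr hx) h)]
    simp only [List.foldl_cons, List.map_cons]
    rw [ih, hstep]
    simp [PySem.Set.update]

-- B's stage-1 loop: the bucket at k holds, in order, the (action, label) pairs of state k
theorem pvFoldB_getD (xs : List (String × String × Int))
    (d : PySem.Dict String (List (String × Int))) (k : String) :
    (xs.foldl pvBStep d).getD k [] =
      d.getD k [] ++ (xs.filter (fun p => p.1 == k)).map (fun p => (p.2.1, p.2.2)) := by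
  induction xs generalizing d with
  | nil => simp
  | cons p t ih =>
    simp only [List.foldl_cons, List.filter_cons]
    rw [ih]
    unfold pvBStep
    rw [PySem.Dict.getD_modify]
    by_cases hk : k = p.1
    · subst hk
      simp
    · have hb : (p.1 == k) = false := by simpa using fun h => hk h.symm
      rw [if_neg hk]
      simp [hb]

-- ===== VERDICT (by name: the statement is the Claim_ definition above) =====
theorem get_preferred_state_action_pairs_spec : Claim_equal_get_preferred_state_action_pairs := by
  intro xs _
  unfold Spec_get_preferred_state_action_pairs get_preferred_state_action_pairs
    get_preferred_state_action_pairs_alt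
  set dA := xs.foldl pvStepA PySem.Dict.empty with hdA
  set dB := xs.foldl pvBStep PySem.Dict.empty with hdB
  have hkA : dA.keys = PySem.Set.ofList (xs.map (fun p => p.1)) := by
    rw [hdA, pvFoldA_keys, PySem.Dict.keys_empty, PySem.Set.ofList_eq_foldl, PySem.Set.update]
  have hkB : dB.keys = PySem.Set.ofList (xs.map (fun p => p.1)) := by
    rw [hdB, pvFoldB_keys, PySem.Dict.keys_empty, PySem.Set.ofList_eq_foldl, PySem.Set.update]
  have hndA : dA.keys.Nodup := by rw [hkA]; exact PySem.Set.nodup_ofList _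
  have hndB : dB.keys.Nodup := by rw [hkB]; exact PySem.Set.nodup_ofList _
  rw [PySem.Dict.items_eq_map_keys dA hndA ([] : List String),
    PySem.Dict.items_eq_map_keys dB hndB ([] : List (String × Int)), List.map_map, hkA, hkB]
  refine List.map_congr_left (fun k _ => ?_)
  simp only [Function.comp]
  rw [hdA, hdB, pvFoldA_getD, pvFoldB_getD, PySem.Dict.getD_empty, PySem.Dict.getD_empty,
    ← PySem.Set.ofList_eq_foldl]
  simp [List.filter_map, List.map_map, List.filter_filter, Function.comp, Bool.and_comm]
  rfl
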